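-- pv_equiv track=rewrite | github.com/marlonmmalgas-oss/AGL-Vessel-Report | HourlyReport5.py | generate_hours
-- ===== SOURCE A (Python) =====
-- def generate_hours(shift):
--     start = 6 if shift=="DAY" else 18
--     hours = []
--     for i in range(12):
--         h1 = (start + i) % 24
--         h2 = (start + i + 1) % 24
--         hours.append(f"{h1:02d}00-{h2:02d}00")
--     return hours
-- ===== SOURCE B (Python) =====
-- def generate_hours(shift):
--     # Build the full 24-label wall-clock cycle once, then rotate it to the
--     # shift's start hour and keep the first 12 labels.
--     cycle = [f"{h:02d}00-{(h + 1) % 24:02d}00" for h in range(24)]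
--     start = 6 if shift == "DAY" else 18
--     return (cycle[start:] + cycle[:start])[:12]
-- ===== Notes on version B (the rewrite author's own statement) =====
-- stated objective: alternative
-- what changed: B builds the full 24-entry wall-clock label cycle once, then obtains the shift's 12 labels by rotating that table to the start hour and truncating, instead of A's loop that computes each shifted pair with per-iteration modular arithmetic.
import Mathlib
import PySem

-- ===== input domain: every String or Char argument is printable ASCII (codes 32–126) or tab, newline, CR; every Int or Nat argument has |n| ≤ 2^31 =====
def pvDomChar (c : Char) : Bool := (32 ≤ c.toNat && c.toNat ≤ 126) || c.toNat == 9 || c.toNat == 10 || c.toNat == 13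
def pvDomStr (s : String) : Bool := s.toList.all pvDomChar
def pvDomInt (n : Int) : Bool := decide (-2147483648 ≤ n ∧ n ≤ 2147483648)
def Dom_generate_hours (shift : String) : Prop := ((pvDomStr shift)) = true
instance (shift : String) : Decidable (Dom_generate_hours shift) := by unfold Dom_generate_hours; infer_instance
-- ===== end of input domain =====

-- B builds the full 24-label wall-clock cycle once, then rotates it to the shift's start hour and truncates to 12; objective: alternative decomposition.


-- ===== PORT A =====
-- f"{h:02d}" zero-pads to width 2; exact for 0 ≤ h (the only values reaching it, since h = … % 24)
def pvPad2A (n : Int) : String := if n < 10 then "0" ++ PySem.Int.toStr n else PySem.Int.toStr n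

def generate_hours (shift : String) : List String :=
  let start : Int := if shift = "DAY" then 6 else 18
  (PySem.List.pyRange 0 12 1).foldl (fun hours i =>
    let h1 := PySem.Int.mod (start + i) 24
    let h2 := PySem.Int.mod (start + i + 1) 24
    hours ++ [pvPad2A h1 ++ "00-" ++ pvPad2A h2 ++ "00"]) []

-- ===== PORT B =====
def pvPad2B (n : Int) : String := if n < 10 then "0" ++ PySem.Int.toStr n else PySem.Int.toStr n

def generate_hours_alt (shift : String) : List String :=
  let cycle := (PySem.List.pyRange 0 24 1).map (fun h =>
    pvPad2B h ++ "00-" ++ pvPad2B (PySem.Int.mod (h + 1) 24) ++ "00")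
  let start : Int := if shift = "DAY" then 6 else 18
  PySem.List.slice (PySem.List.slice cycle (some start) none ++
    PySem.List.slice cycle none (some start)) none (some 12)

-- ===== PRECONDITION & SPEC =====
def Spec_generate_hours (shift : String) (out : List String) : Prop := out = generate_hours_alt shift
instance (shift : String) (out : List String) : Decidable (Spec_generate_hours shift out) := by unfold Spec_generate_hours; infer_instance

-- ===== CLAIM (what is proved, stated in full; the proofs are below) =====
def Claim_equal_generate_hours : Prop := ∀ (shift : String), Dom_generate_hours shift → Spec_generate_hours shift (generate_hours shift)

-- ===== LEMMAS AND PROOFS =====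

-- ===== VERDICT (by name: the statement is the Claim_ definition above) =====
theorem generate_hours_spec : Claim_equal_generate_hours := by
  intro shift _
  unfold Spec_generate_hours generate_hours generate_hours_alt
  by_cases h : shift = "DAY" <;> (simp only [h, reduceIte]; decide)
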